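-- pv_equiv track=rewrite | github.com/HRL-Mike/homepage | Projects/3_Knowledge_graph/3_Data_preprocessing/BIO/integrate_label.py | integration_without_label
-- ===== SOURCE A (Python) =====
-- def integration_without_label(content_list):  # 整合月份缩写，不依赖标签 (标签为'O')
--
--     month_list = ['Jan', 'Feb', 'Mar', 'Apr', 'May', 'Jun', 'Jul', 'Aug', 'Sep', 'Oct', 'Nov', 'Dec']
--
--     position_list = []
--     for i in range(len(content_list)):
--         if content_list[i][0]:
--            if content_list[i][0] in month_list:
--                if content_list[i+1][0]:
--                    if content_list[i+1][0] == '.':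
--                     position_list.append(i)
--                else:
--                    continue
--            else:
--                continue
--         else:
--             continue
--
--     for subscript in position_list[::-1]:  # 倒序整合
--         ptr1 = subscript
--         ptr2 = subscript+1
--         token = ''
--         label = content_list[ptr1][-1]
--         while ptr1 <= ptr2:
--             token = token + content_list[ptr1][0]
--             ptr1 += 1
--         insert_obj = [token, label]
--
--         del content_list[subscript:subscript+2]  # 切片操作的右区间为开区间
--         content_list.insert(subscript, insert_obj)
--
--     return content_list
-- ===== SOURCE B (Python) =====
-- MONTHS = frozenset(['Jan', 'Feb', 'Mar', 'Apr', 'May', 'Jun',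
--                     'Jul', 'Aug', 'Sep', 'Oct', 'Nov', 'Dec'])
--
--
-- def integration_without_label(content_list):
--     # Single forward pass: copy rows into a fresh list, merging each month + '.' pair as it
--     # is reached.  (A mutates content_list in place; B only reads it — the equivalence is
--     # about the return value.)
--     result = []
--     i = 0
--     n = len(content_list)
--     while i < n:
--         row = content_list[i]
--         if row[0] in MONTHS and content_list[i + 1][0] == '.':
--             result.append([row[0] + content_list[i + 1][0], row[-1]])
--             i += 2
--         else:
--             result.append(row)
--             i += 1
--     return result
-- ===== Notes on version B (the rewrite author's own statement) =====
-- stated objective: alternative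
-- what changed: B replaces A's two-phase algorithm (an index scan collecting merge positions, then reverse-order in-place del/insert per merge, each re-walking the list) with a single forward index pass that copies rows into a fresh result list, merging each month+'.' pair as it is reached (B does not mutate its argument; A does, in place).
import Mathlib
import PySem

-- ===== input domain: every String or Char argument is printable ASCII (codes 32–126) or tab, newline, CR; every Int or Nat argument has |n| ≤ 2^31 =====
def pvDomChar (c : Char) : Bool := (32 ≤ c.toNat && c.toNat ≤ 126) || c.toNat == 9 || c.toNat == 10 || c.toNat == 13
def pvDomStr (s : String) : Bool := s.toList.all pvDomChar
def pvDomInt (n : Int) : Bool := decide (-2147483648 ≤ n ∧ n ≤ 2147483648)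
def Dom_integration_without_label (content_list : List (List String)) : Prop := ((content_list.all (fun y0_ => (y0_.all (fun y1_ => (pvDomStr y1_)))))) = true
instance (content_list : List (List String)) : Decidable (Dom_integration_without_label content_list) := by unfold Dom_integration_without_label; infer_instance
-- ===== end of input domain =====

-- B replaces A's index scan + repeated in-place del/insert with one forward pass onto a fresh
-- list (A mutates its argument in place and returns it; B leaves the argument untouched —
-- the equivalence proved here is about the return value only).

-- ===== PORT A =====
def pvMonthList : List String := ["Jan", "Feb", "Mar", "Apr", "May", "Jun", "Jul", "Aug", "Sep", "Oct", "Nov", "Dec"]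

-- first loop of A: collect the positions of month tokens followed by '.'
def pvPositions (content_list : List (List String)) : List Nat :=
  (List.range content_list.length).foldl (fun (acc : List Nat) (i : Nat) =>
    match PySem.List.pyGet? content_list (i : Int) with
    | none => acc        -- unreachable: i < len(content_list)
    | some row =>
      match PySem.List.pyGet? row 0 with
      | none => acc      -- Python raises IndexError on an empty row; excluded by Pre_
      | some h =>
        if h ≠ "" then                       -- `if content_list[i][0]:`
          if h ∈ pvMonthList then
            match PySem.List.pyGet? content_list ((i : Int) + 1) with
            | none => acc  -- Python raises IndexError (month in the last row); excluded by Pre_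
            | some row2 =>
              match PySem.List.pyGet? row2 0 with
              | none => acc  -- IndexError on an empty row; excluded by Pre_
              | some h2 =>
                if h2 ≠ "" then              -- `if content_list[i+1][0]:`
                  if h2 = "." then acc ++ [i] else acc
                else acc
          else acc
        else acc) []

-- A's inner `while ptr1 <= ptr2` loop building the merged token
def pvWhileToken (cl : List (List String)) (ptr1 ptr2 : Nat) (token : String) : String :=
  if ptr1 ≤ ptr2 then
    pvWhileToken cl (ptr1 + 1) ptr2
      (token ++ ((PySem.List.pyGet? ((PySem.List.pyGet? cl (ptr1 : Int)).getD []) 0).getD ""))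
  else token
termination_by ptr2 + 1 - ptr1

-- one iteration of A's second loop: merge rows `subscript` and `subscript+1`
-- (del content_list[s:s+2] is exactly take s ++ drop (s+2) for a nonnegative s: Python slices clamp like take/drop)
def pvMergeStep (cl : List (List String)) (subscript : Nat) : List (List String) :=
  let label := (PySem.List.pyGet? ((PySem.List.pyGet? cl (subscript : Int)).getD []) (-1)).getD ""
  let token := pvWhileToken cl subscript (subscript + 1) ""
  PySem.List.insert (cl.take subscript ++ cl.drop (subscript + 2)) (subscript : Int) [token, label]

-- `for subscript in position_list[::-1]` is the fold over the reversed position list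
def integration_without_label (content_list : List (List String)) : List (List String) :=
  (pvPositions content_list).reverse.foldl pvMergeStep content_list

-- ===== PORT B =====
def pvMonthSet : PySem.Set String := PySem.Set.ofList pvMonthList   -- Source B's frozenset MONTHS

def pvHead0 (row : List String) : String := (PySem.List.pyGet? row 0).getD ""

-- Source B's `while i < n` loop: walk the indices, appending to `result`
-- (content_list[i+1] raises IndexError in Python when i+1 == n — a trailing month row, excluded by Pre_)
def pvAltGoIdx (cl : List (List String)) (n : Nat) (i : Nat) (result : List (List String)) :
    List (List String) :=
  if i < n then
    let row := (PySem.List.pyGet? cl (i : Int)).getD []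
    if pvHead0 row ∈ pvMonthSet ∧ pvHead0 ((PySem.List.pyGet? cl ((i : Int) + 1)).getD []) = "." then
      pvAltGoIdx cl n (i + 2)
        (result ++ [[pvHead0 row ++ pvHead0 ((PySem.List.pyGet? cl ((i : Int) + 1)).getD []),
          (PySem.List.pyGet? row (-1)).getD ""]])
    else
      pvAltGoIdx cl n (i + 1) (result ++ [row])
  else result
termination_by n - i


def integration_without_label_alt (content_list : List (List String)) : List (List String) :=
  pvAltGoIdx content_list content_list.length 0 []

-- ===== PRECONDITION & SPEC =====
-- Pre_ excludes exactly the inputs on which the Python A raises IndexError: an empty inner row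
-- (content_list[i][0]), or a month abbreviation in the last row (content_list[i+1] out of range).
def Pre_integration_without_label (content_list : List (List String)) : Prop :=
  (∀ row ∈ content_list, row ≠ []) ∧
  (content_list.getLast?.all (fun row => !(decide (row.headD "" ∈ pvMonthList))) = true)
instance (content_list : List (List String)) : Decidable (Pre_integration_without_label content_list) := by unfold Pre_integration_without_label; infer_instance

def pvWitness_integration_without_label : List (List String) :=
  [["Jan", "O"], [".", "O"], ["2019", "O"], ["May", "B"], [".", "O"], ["x", "O"]]

def Spec_integration_without_label (content_list : List (List String)) (out : List (List String)) : Prop := out = integration_without_label_alt content_list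
instance (content_list : List (List String)) (out : List (List String)) : Decidable (Spec_integration_without_label content_list out) := by unfold Spec_integration_without_label; infer_instance

-- ===== CLAIM (what is proved, stated in full; the proofs are below) =====
def Claim_equal_integration_without_label : Prop := ∀ (content_list : List (List String)), Dom_integration_without_label content_list → Pre_integration_without_label content_list → Spec_integration_without_label content_list (integration_without_label content_list)

-- ===== LEMMAS AND PROOFS =====

-- proof-only bridge: Source B's index loop, read as structural recursion on the remaining rows
def pvAltGo : List (List String) → List (List String) → List (List String)
  | [], result => result
  | [row], result => result ++ [row]
  | row :: r2 :: rest, result =>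
    if pvHead0 row ∈ pvMonthSet ∧ pvHead0 r2 = "." then
      pvAltGo rest (result ++ [[pvHead0 row ++ pvHead0 r2, (PySem.List.pyGet? row (-1)).getD ""]])
    else
      pvAltGo (r2 :: rest) (result ++ [row])



-- the Bool condition A's first loop tests at index i (row = content_list[i], next? = content_list[i+1] if any)
def pvCond (row : List String) (next? : Option (List String)) : Bool :=
  match PySem.List.pyGet? row 0 with
  | none => false
  | some h =>
    if h ≠ "" then
      if h ∈ pvMonthList then
        match next? with
        | none => false
        | some row2 =>
          match PySem.List.pyGet? row2 0 with
          | none => false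
          | some h2 => if h2 ≠ "" then decide (h2 = ".") else false
      else false
    else false


lemma pvCond_none (row : List String) : pvCond row none = false := by
  unfold pvCond
  rcases PySem.List.pyGet? row 0 with _ | h
  · rfl
  · by_cases h1 : h ≠ "" <;> by_cases h2 : h ∈ pvMonthList <;> simp [h1, h2]

lemma pvCond_of_dot (r2 : List String) (h : pvHead0 r2 = ".") (x : Option (List String)) :
    pvCond r2 x = false := by
  unfold pvCond
  rcases hr : PySem.List.pyGet? r2 0 with _ | h0
  · rfl
  · have : h0 = "." := by unfold pvHead0 at h; rw [hr] at h; simpa using h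
    subst this
    simp [show ("." : String) ∉ pvMonthList from by decide]

lemma pvCond_some (row r2 : List String) :
    pvCond row (some r2) = true ↔ (pvHead0 row ∈ pvMonthSet ∧ pvHead0 r2 = ".") := by
  have hne : ¬ (("" : String) ∈ pvMonthList) := by decide
  unfold pvCond pvHead0
  simp only [pvMonthSet, PySem.Set.mem_ofList]
  rcases hr : PySem.List.pyGet? row 0 with _ | h
  · simp [hne]
  · by_cases h0 : h = ""
    · subst h0; simp [hne]
    · simp only [Option.getD_some, ne_eq, h0, not_false_iff, if_true]
      by_cases hm : h ∈ pvMonthList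
      · simp only [hm, if_true]
        rcases hr2 : PySem.List.pyGet? r2 0 with _ | h2
        · simp
        · by_cases h20 : h2 = ""
          · subst h20; simp
          · simp [h20]
      · simp [hm]

lemma pvPositions_filter (cl : List (List String)) :
    pvPositions cl = (List.range cl.length).filter (fun i => pvCond (cl.getD i []) cl[i+1]?) := by
  unfold pvPositions
  rw [PySem.List.foldl_congr_mem _ _
    (fun (acc : List Nat) (i : Nat) => if pvCond (cl.getD i []) cl[i+1]? then acc ++ [i] else acc) []
    ?_]
  · rw [PySem.List.foldl_append_if (fun i => pvCond (cl.getD i []) cl[i+1]?) (fun i => i)]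
    simp
  · intro acc i hi
    rw [List.mem_range] at hi
    have h1 : PySem.List.pyGet? cl (i : Int) = some (cl.getD i []) := by
      rw [PySem.List.pyGet?_natCast, List.getElem?_eq_getElem hi, List.getD_eq_getElem _ _ hi]
    have h2 : PySem.List.pyGet? cl ((i : Int) + 1) = cl[i+1]? := by
      rw [show ((i:Int)+1) = ((i+1:Nat):Int) from by push_cast; ring, PySem.List.pyGet?_natCast]
    rw [h1, h2]
    unfold pvCond
    rcases hA : PySem.List.pyGet? (cl.getD i []) 0 with _ | h
    · simp only [hA]; simp
    · simp only [hA]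
      by_cases hh : h = ""
      · simp [hh]
      · simp only [ne_eq, hh]
        by_cases hm : h ∈ pvMonthList
        · simp only [hm, if_true, not_false_iff]
          rcases hB : cl[i+1]? with _ | row2
          · simp
          · rcases hC : PySem.List.pyGet? row2 0 with _ | h2
            · simp [hC]
            · simp only [hC]
              by_cases hh2 : h2 = "" <;> simp [hh2]
        · simp [hm]


lemma pvPositions_cons (a : List String) (l : List (List String)) :
    pvPositions (a :: l) =
      (if pvCond a l[0]? then [0] else []) ++ (pvPositions l).map (· + 1) := by
  rw [pvPositions_filter, pvPositions_filter]
  simp only [List.length_cons, List.range_succ_eq_map, List.filter_cons]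
  have hpq : (fun i => pvCond ((a :: l).getD i []) (a :: l)[i+1]?) ∘ Nat.succ
      = fun i => pvCond (l.getD i []) l[i+1]? := by funext i; rfl
  rw [List.filter_map, hpq]
  have h0 : pvCond ((a :: l).getD 0 []) (a :: l)[0+1]? = pvCond a l[0]? := rfl
  rw [h0]
  by_cases hc0 : pvCond a l[0]?
  · simp [hc0]
  · simp [hc0]

lemma pvWhileToken_closed (cl : List (List String)) (p : Nat) (t : String) :
    pvWhileToken cl p (p + 1) t =
      t ++ ((PySem.List.pyGet? ((PySem.List.pyGet? cl (p : Int)).getD []) 0).getD "")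
        ++ ((PySem.List.pyGet? ((PySem.List.pyGet? cl ((p : Int) + 1)).getD []) 0).getD "") := by
  rw [pvWhileToken, if_pos (by omega), pvWhileToken, if_pos (by omega), pvWhileToken,
    if_neg (by omega)]
  push_cast
  rw [String.append_assoc]


lemma pvInsert_cons {α : Type} (a : α) (xs : List α) (s : Nat) (v : α) :
    PySem.List.insert (a :: xs) ((s : Int) + 1) v = a :: PySem.List.insert xs (s : Int) v := by
  simp only [PySem.List.insert, PySem.List.sliceIndices, List.length_cons]
  rw [if_neg (by omega), if_neg (by omega), if_neg (by omega), if_neg (by omega)]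
  have h1 : (min ((s:Int) + 1) ((xs.length + 1 : Nat) : Int)).toNat
      = (min (s:Int) (xs.length:Int)).toNat + 1 := by push_cast; omega
  rw [h1, List.take_succ_cons, List.drop_succ_cons]
  simp



lemma pyGet?_cons_natSucc (x : List String) (xs : List (List String)) (n : Nat) :
    PySem.List.pyGet? (x :: xs) (((n + 1 : Nat)) : Int) = PySem.List.pyGet? xs (n : Int) := by
  rw [show ((n + 1 : Nat) : Int) = ((n : Int) + 1) from by push_cast; ring,
    PySem.List.pyGet?_cons_succ]


lemma pvInsert_cons' (a : List String) (xs : List (List String)) (s : Nat) (v : List String) :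
    PySem.List.insert (a :: xs) (((s + 1 : Nat)) : Int) v = a :: PySem.List.insert xs (s : Int) v := by
  rw [show ((s + 1 : Nat) : Int) = ((s : Int) + 1) from by push_cast; ring, pvInsert_cons]


lemma pvMergeStep_cons (a : List String) (cl : List (List String)) (s : Nat) :
    pvMergeStep (a :: cl) (s + 1) = a :: pvMergeStep cl s := by
  unfold pvMergeStep
  rw [pvWhileToken_closed, pvWhileToken_closed]
  have c1 : ((s + 1 : Nat) : Int) + 1 = (((s + 1) + 1 : Nat) : Int) := by push_cast; ring
  have c2 : (s : Int) + 1 = ((s + 1 : Nat) : Int) := by push_cast; ring_nf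
  have c3 : s + 1 + 2 = (s + 2) + 1 := by ring
  simp only [c1, c2, pyGet?_cons_natSucc, c3, List.take_succ_cons, List.drop_succ_cons,
    List.cons_append, pvInsert_cons']


lemma pvMergeStep_zero (row r2 : List String) (X : List (List String)) :
    pvMergeStep (row :: r2 :: X) 0 =
      [pvHead0 row ++ pvHead0 r2, (PySem.List.pyGet? row (-1)).getD ""] :: X := by
  unfold pvMergeStep pvHead0
  rw [pvWhileToken_closed]
  have c1 : ((0 : Nat) : Int) + 1 = ((1 : Nat) : Int) := by norm_num
  have c0 : ((0 : Nat) : Int) = 0 := by norm_num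
  simp only [c0, PySem.List.insert_zero]
  simp [List.drop, PySem.List.pyGet?_zero]

lemma pvFoldl_merge_shift (qs : List Nat) (a : List String) (cl : List (List String)) :
    List.foldl pvMergeStep (a :: cl) (qs.map (· + 1)) = a :: List.foldl pvMergeStep cl qs := by
  induction qs generalizing a cl with
  | nil => rfl
  | cons q qs ih => simp only [List.map_cons, List.foldl_cons, pvMergeStep_cons, ih]

lemma pvAltGo_acc (l : List (List String)) : ∀ res, pvAltGo l res = res ++ pvAltGo l [] := by
  have H : ∀ (l res0 : List (List String)), ∀ res, pvAltGo l res = res ++ pvAltGo l [] := by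
    intro l res0
    induction l, res0 using pvAltGo.induct with
    | case1 _ => intro res; simp [pvAltGo]
    | case2 _ row => intro res; simp [pvAltGo]
    | case3 row r2 rest res0 hc ih =>
      intro res
      rw [pvAltGo, pvAltGo, if_pos hc, if_pos hc, ih, ih ([] ++ _)]
      simp
    | case4 row r2 rest res0 hc ih =>
      intro res
      rw [pvAltGo, pvAltGo, if_neg hc, if_neg hc, ih, ih ([] ++ _)]
      simp
  exact H l []

lemma pvMain (cl : List (List String)) :
    List.foldl pvMergeStep cl (pvPositions cl).reverse = pvAltGo cl [] := by
  have H : ∀ (n : Nat) (cl : List (List String)), cl.length ≤ n →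
      List.foldl pvMergeStep cl (pvPositions cl).reverse = pvAltGo cl [] := by
    intro n
    induction n with
    | zero =>
      intro cl h
      have : cl = [] := List.length_eq_zero_iff.mp (Nat.le_zero.mp h)
      subst this
      rfl
    | succ n ih =>
      intro cl h
      match cl with
      | [] => rfl
      | [row] =>
        have h0 : pvPositions [row] = [] := by
          rw [pvPositions_cons]
          simp [pvCond_none, show pvPositions ([] : List (List String)) = [] from rfl]
        rw [h0, pvAltGo]
        simp
      | row :: r2 :: rest =>
        have hlen : rest.length ≤ n := by simp at h; omega
        by_cases hc : pvCond row (some r2)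
        · have hb : pvHead0 row ∈ pvMonthSet ∧ pvHead0 r2 = "." := (pvCond_some row r2).mp hc
          have h2 : pvPositions (r2 :: rest) = (pvPositions rest).map (· + 1) := by
            rw [pvPositions_cons]
            simp [pvCond_of_dot r2 hb.2]
          rw [pvPositions_cons]
          simp only [List.getElem?_cons_zero]
          rw [if_pos hc, h2, List.singleton_append, List.reverse_cons, List.foldl_append,
            ← List.map_reverse, ← List.map_reverse, pvFoldl_merge_shift, pvFoldl_merge_shift,
            List.foldl_cons, List.foldl_nil, pvMergeStep_zero,
            ih rest hlen, pvAltGo, if_pos hb,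
            pvAltGo_acc rest ([] ++ [[pvHead0 row ++ pvHead0 r2, (PySem.List.pyGet? row (-1)).getD ""]])]
          simp
        · have hb : ¬ (pvHead0 row ∈ pvMonthSet ∧ pvHead0 r2 = ".") :=
            fun hx => hc ((pvCond_some row r2).mpr hx)
          have hlen2 : (r2 :: rest).length ≤ n := by simp at h ⊢; omega
          rw [pvPositions_cons]
          simp only [List.getElem?_cons_zero]
          rw [if_neg hc, List.nil_append, ← List.map_reverse, pvFoldl_merge_shift,
            ih (r2 :: rest) hlen2, pvAltGo, if_neg hb, pvAltGo_acc (r2 :: rest) ([] ++ [row])]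
          simp
  exact H cl.length cl le_rfl

lemma pvGetAt_append (pre : List (List String)) (suf : List (List String)) (k : Nat) :
    PySem.List.pyGet? (pre ++ suf) ((pre.length : Int) + k) = suf[k]? := by
  rw [show ((pre.length : Int) + k) = ((pre.length + k : Nat) : Int) from by push_cast; ring,
    PySem.List.pyGet?_natCast, List.getElem?_append_right (by omega)]
  simp

lemma pvAltGoIdx_eq (suf : List (List String)) :
    ∀ (res : List (List String)), ∀ (pre : List (List String)),
      pvAltGoIdx (pre ++ suf) (pre ++ suf).length pre.length res = pvAltGo suf res := by
  have H : ∀ (suf res0 : List (List String)), ∀ res pre,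
      pvAltGoIdx (pre ++ suf) (pre ++ suf).length pre.length res = pvAltGo suf res := by
    intro suf res0
    induction suf, res0 using pvAltGo.induct with
    | case1 _ =>
      intro res pre
      rw [pvAltGoIdx, if_neg (by simp), pvAltGo]
    | case2 row _ =>
      intro res pre
      have hrow : PySem.List.pyGet? (pre ++ [row]) ((pre.length : Int)) = some row := by
        simp
      have hnext : PySem.List.pyGet? (pre ++ [row]) ((pre.length : Int) + 1) = none := by
        rw [show ((pre.length : Int) + 1) = ((pre.length : Int) + (1 : Nat)) from by push_cast; ring,
          pvGetAt_append]
        simp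
      rw [pvAltGoIdx, if_pos (by simp), pvAltGo]
      simp only [hrow, hnext, Option.getD_some, Option.getD_none]
      rw [if_neg (by simp [pvHead0, PySem.List.pyGet?])]
      rw [pvAltGoIdx, if_neg (by simp)]
    | case3 row r2 rest res0 hc ih =>
      intro res pre
      have hrow : PySem.List.pyGet? (pre ++ (row :: r2 :: rest)) ((pre.length : Int)) = some row := by
        simp
      have hnext : PySem.List.pyGet? (pre ++ (row :: r2 :: rest)) ((pre.length : Int) + 1) = some r2 := by
        rw [show ((pre.length : Int) + 1) = ((pre.length : Int) + (1 : Nat)) from by push_cast; ring,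
          pvGetAt_append]
        simp
      rw [pvAltGoIdx, if_pos (by simp), pvAltGo, if_pos hc]
      simp only [hrow, hnext, Option.getD_some]
      rw [if_pos hc]
      have hassoc : pre ++ (row :: r2 :: rest) = (pre ++ [row, r2]) ++ rest := by simp
      have hlen : pre.length + 2 = (pre ++ [row, r2]).length := by simp
      rw [hassoc, hlen, ih _ (pre ++ [row, r2])]
    | case4 row r2 rest res0 hc ih =>
      intro res pre
      have hrow : PySem.List.pyGet? (pre ++ (row :: r2 :: rest)) ((pre.length : Int)) = some row := by
        simp
      have hnext : PySem.List.pyGet? (pre ++ (row :: r2 :: rest)) ((pre.length : Int) + 1) = some r2 := by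
        rw [show ((pre.length : Int) + 1) = ((pre.length : Int) + (1 : Nat)) from by push_cast; ring,
          pvGetAt_append]
        simp
      rw [pvAltGoIdx, if_pos (by simp), pvAltGo, if_neg hc]
      simp only [hrow, hnext, Option.getD_some]
      rw [if_neg hc]
      have hassoc : pre ++ (row :: r2 :: rest) = (pre ++ [row]) ++ (r2 :: rest) := by simp
      have hlen : pre.length + 1 = (pre ++ [row]).length := by simp
      rw [hassoc, hlen, ih _ (pre ++ [row])]
  exact fun res pre => H suf [] res pre

-- ===== VERDICT (by name: the statement is the Claim_ definition above) =====
theorem integration_without_label_spec : Claim_equal_integration_without_label := by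
  intro cl _ _
  show integration_without_label cl = integration_without_label_alt cl
  unfold integration_without_label integration_without_label_alt
  rw [pvMain]
  exact (by simpa using pvAltGoIdx_eq cl [] [] :
    pvAltGoIdx cl cl.length 0 [] = pvAltGo cl []).symm
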